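-- pv_equiv track=rewrite | github.com/barbare8/goa | day 54/cw/cw.01.py | maskify
-- ===== SOURCE A (Python) =====
-- def maskify(cc):
--     len_num = len(cc)
--     if len_num <4:
--         return cc
--     res = []
--     for i in cc[:-4]:
--         res.append("#")
--     return"".join(res) +  cc[-4:]
-- ===== SOURCE B (Python) =====
-- def maskify(cc):
--     out = []
--     kept = 0
--     for c in reversed(cc):
--         if kept < 4:
--             out.append(c)
--             kept += 1
--         else:
--             out.append("#")
--     out.reverse()
--     return "".join(out)
-- ===== Notes on version B (the rewrite author's own statement) =====
-- stated objective: alternative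
-- what changed: B traverses the string in reverse, keeping the first four characters it sees and masking the rest via a kept-counter, then reverses the accumulator; A computes the length up front, loops over a prefix slice and concatenates the suffix slice.
import Mathlib
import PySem

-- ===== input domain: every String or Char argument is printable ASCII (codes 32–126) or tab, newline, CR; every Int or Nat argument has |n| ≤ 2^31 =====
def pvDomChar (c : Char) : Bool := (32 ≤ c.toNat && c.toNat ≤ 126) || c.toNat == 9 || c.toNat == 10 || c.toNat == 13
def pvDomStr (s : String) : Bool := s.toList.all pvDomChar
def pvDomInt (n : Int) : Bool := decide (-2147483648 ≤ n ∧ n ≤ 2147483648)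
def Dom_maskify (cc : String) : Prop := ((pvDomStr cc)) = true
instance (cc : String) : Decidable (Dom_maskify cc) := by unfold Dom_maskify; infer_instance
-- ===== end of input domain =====

-- B traverses the string in reverse with a kept-counter (keep the first four seen,
-- mask the rest) and reverses the accumulator, instead of A's length test + prefix
-- loop + suffix slice (objective: alternative).

-- ===== PORT A =====
def maskify (cc : String) : String :=
  let len_num : Int := cc.toList.length
  if len_num < 4 then cc
  else
    -- res = []; for i in cc[:-4]: res.append("#")
    let res : List Char :=
      (PySem.List.slice cc.toList none (some (-4))).foldl (fun acc _ => acc ++ ['#']) []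
    -- "".join(res) + cc[-4:]
    String.ofList (res ++ PySem.List.slice cc.toList (some (-4)) none)

-- ===== PORT B =====
-- out = []; kept = 0; for c in reversed(cc): append c (kept+=1) if kept<4 else '#'; out.reverse(); join
def maskify_alt (cc : String) : String :=
  let st := cc.toList.reverse.foldl
    (fun (p : List Char × Nat) c => if p.2 < 4 then (p.1 ++ [c], p.2 + 1) else (p.1 ++ ['#'], p.2))
    ([], 0)
  String.ofList st.1.reverse

-- ===== PRECONDITION & SPEC =====
def Spec_maskify (cc : String) (out : String) : Prop := out = maskify_alt cc
instance (cc : String) (out : String) : Decidable (Spec_maskify cc out) := by unfold Spec_maskify; infer_instance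

-- ===== CLAIM =====
def Claim_equal_maskify : Prop := ∀ (cc : String), Dom_maskify cc → Spec_maskify cc (maskify cc)

-- ===== LEMMAS AND PROOFS =====

theorem foldl_hash (l : List Char) (acc : List Char) :
    l.foldl (fun acc _ => acc ++ ['#']) acc = acc ++ List.replicate l.length '#' := by
  induction l generalizing acc with
  | nil => simp
  | cons x xs ih =>
      rw [List.foldl_cons, ih, List.length_cons]
      simp [List.append_assoc, List.replicate_succ]

theorem fold_kept (r : List Char) (acc : List Char) (k : Nat) :
    (r.foldl
      (fun (p : List Char × Nat) c => if p.2 < 4 then (p.1 ++ [c], p.2 + 1) else (p.1 ++ ['#'], p.2))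
      (acc, k)).1
    = acc ++ r.take (4 - k) ++ List.replicate (r.length - (4 - k)) '#' := by
  induction r generalizing acc k with
  | nil => simp
  | cons c rest ih =>
      rw [List.foldl_cons]
      by_cases h : k < 4
      · have h4 : 4 - k = (4 - (k + 1)) + 1 := by omega
        simp only [h, if_true, ih, h4, List.take_succ_cons, List.length_cons,
          List.append_assoc, List.cons_append, List.nil_append, Nat.succ_sub_succ]
      · have h0 : 4 - k = 0 := by omega
        simp only [h, if_false, ih, h0, List.take_zero, List.length_cons,
          Nat.sub_zero, List.append_nil, List.append_assoc]
        simp [List.replicate_succ]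
  
theorem rev_take_rev (l : List Char) (n : Nat) :
    (l.reverse.take n).reverse = l.drop (l.length - n) := by
  rw [List.take_reverse, List.reverse_reverse]

theorem maskify_eq_alt (cc : String) : maskify cc = maskify_alt cc := by
  simp only [maskify, maskify_alt]
  rw [fold_kept]
  simp only [List.nil_append, Nat.sub_zero, List.reverse_append, List.reverse_replicate,
    List.length_reverse, rev_take_rev]
  by_cases h : ((cc.toList.length : Int)) < 4
  · have hL : cc.toList.length < 4 := by exact_mod_cast h
    have h1 : cc.toList.length - 4 = 0 := by omega
    simp only [h, if_true, h1]
    simp [String.ofList]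
  · have hlen : 4 ≤ cc.toList.length := by exact_mod_cast not_lt.mp h
    have hslice₁ : PySem.List.slice cc.toList none (some (-4)) = cc.toList.take (cc.toList.length - 4) :=
      PySem.List.slice_to_neg_ofNat cc.toList 4 (by omega)
    have hslice₂ : PySem.List.slice cc.toList (some (-4)) none = cc.toList.drop (cc.toList.length - 4) :=
      PySem.List.slice_from_neg_ofNat cc.toList 4 (by omega)
    have hmin : min (cc.toList.length - 4) cc.toList.length = cc.toList.length - 4 := by omega
    simp only [h, if_false, hslice₁, hslice₂, foldl_hash, List.nil_append,
      List.length_take, hmin]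

-- ===== VERDICT =====
theorem maskify_spec : Claim_equal_maskify := by
  intro cc _
  unfold Spec_maskify
  exact maskify_eq_alt cc
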